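-- pv_equiv track=rewrite | github.com/ShanHuang08/Python-repository | CodeWars/CodeWars202312.py | pick_peaks_best
-- ===== SOURCE A (Python) =====
-- def pick_peaks_best(arr):
--     pos = []
--     prob_peak = False
--     for i in range(1, len(arr)):
--         if arr[i] > arr[i-1]:
--             prob_peak = i
--         elif arr[i] < arr[i-1] and prob_peak:
--             pos.append(prob_peak)
--             prob_peak = False
--     return {'pos':pos, 'peaks':[arr[i] for i in pos]}
-- ===== SOURCE B (Python) =====
-- def pick_peaks_best(arr):
--     # collapse consecutive-equal runs into (first_index, value) pairs
--     runs = []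
--     prev = None
--     for i, x in enumerate(arr):
--         if prev is None or prev != x:
--             runs.append((i, x))
--         prev = x
--     # a run is a peak iff strictly above both neighbouring runs
--     pos = [s for (_, vl), (s, v), (_, vr) in zip(runs, runs[1:], runs[2:])
--            if vl < v > vr]
--     return {'pos': pos, 'peaks': [arr[i] for i in pos]}
-- ===== Notes on version B (the rewrite author's own statement) =====
-- stated objective: alternative
-- what changed: B replaces A's one-pass state machine (pending-peak flag updated per element) with run-length encoding: collapse equal runs to (first_index, value) pairs, then pick runs strictly above both neighbouring runs via a 3-window zip.
import Mathlib
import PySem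

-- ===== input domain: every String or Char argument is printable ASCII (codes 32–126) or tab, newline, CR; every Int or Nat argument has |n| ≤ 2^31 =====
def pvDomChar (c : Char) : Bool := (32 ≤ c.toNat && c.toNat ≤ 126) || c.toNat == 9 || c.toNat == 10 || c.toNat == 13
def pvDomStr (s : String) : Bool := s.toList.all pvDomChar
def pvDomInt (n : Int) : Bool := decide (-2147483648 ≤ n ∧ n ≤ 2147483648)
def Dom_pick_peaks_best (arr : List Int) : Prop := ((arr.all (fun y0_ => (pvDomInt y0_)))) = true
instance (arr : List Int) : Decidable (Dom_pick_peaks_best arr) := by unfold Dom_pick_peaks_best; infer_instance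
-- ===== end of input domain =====

-- B collapses the array into runs and selects runs strictly above both neighbours (alternative decomposition, same O(n) cost); return value only.

-- ===== PORT A =====
-- A's loop over i in range(1, len(arr)) comparing arr[i] with arr[i-1], carried as a
-- recursion over the tail with prev = arr[i-1]; prob_peak's False/int is Option Int
-- (the stored index i is always ≥ 1, hence truthy in Python).
def pickGoA (prev : Int) (xs : List Int) (i : Int) (pos : List Int) (prob : Option Int) :
    List Int × Option Int :=
  match xs with
  | [] => (pos, prob)
  | x :: rest =>
    if x > prev then pickGoA x rest (i + 1) pos (some i)
    else if x < prev then
      match prob with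
      | some p => pickGoA x rest (i + 1) (pos ++ [p]) none
      | none => pickGoA x rest (i + 1) pos none
    else pickGoA x rest (i + 1) pos prob

def pick_peaks_best (arr : List Int) : List (String × List Int) :=
  match arr with
  | [] => [("pos", []), ("peaks", [])]
  | a :: rest =>
    let pos := (pickGoA a rest 1 [] none).1
    -- indices in pos are always in range, so pyGetD's default is never used
    [("pos", pos), ("peaks", pos.map (fun i => PySem.List.pyGetD arr i 0))]

-- ===== PORT B =====
-- runs: the (first_index, value) pair of each maximal run of equal values
def pickRuns (i : Int) (prev : Option Int) (xs : List Int) : List (Int × Int) :=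
  match xs with
  | [] => []
  | x :: rest =>
    if prev ≠ some x then (i, x) :: pickRuns (i + 1) (some x) rest
    else pickRuns (i + 1) (some x) rest

-- zip(runs, runs[1:], runs[2:]) filtered on vl < v > vr
def pickWindows : List (Int × Int) → List Int
  | (_, vl) :: (s, v) :: (t, vr) :: rest =>
    (if vl < v ∧ v > vr then [s] else []) ++ pickWindows ((s, v) :: (t, vr) :: rest)
  | _ => []

def pick_peaks_best_alt (arr : List Int) : List (String × List Int) :=
  let pos := pickWindows (pickRuns 0 none arr)
  [("pos", pos), ("peaks", pos.map (fun i => PySem.List.pyGetD arr i 0))]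

-- ===== PRECONDITION & SPEC =====
def Spec_pick_peaks_best (arr : List Int) (out : List (String × List Int)) : Prop := out = pick_peaks_best_alt arr
instance (arr : List Int) (out : List (String × List Int)) : Decidable (Spec_pick_peaks_best arr out) := by unfold Spec_pick_peaks_best; infer_instance

-- ===== CLAIM (what is proved, stated in full; the proofs are below) =====
def Claim_equal_pick_peaks_best : Prop := ∀ (arr : List Int), Dom_pick_peaks_best arr → Spec_pick_peaks_best arr (pick_peaks_best arr)

-- ===== LEMMAS AND PROOFS =====

-- bridge machine: A's state machine replayed on the run list
def pickMachine (u : Int) (prob : Option Int) : List (Int × Int) → List Int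
  | [] => []
  | (s, v) :: rest =>
    if v > u then pickMachine v (some s) rest
    else (match prob with | some p => [p] | none => []) ++ pickMachine v none rest

-- adjacent values in the run list are pairwise distinct, and the first differs from u
def pickAdj (u : Int) : List (Int × Int) → Prop
  | [] => True
  | (_, v) :: rest => v ≠ u ∧ pickAdj v rest

theorem pickRuns_adj (xs : List Int) : ∀ (i u : Int), pickAdj u (pickRuns i (some u) xs) := by
  induction xs with
  | nil => intro i u; simp [pickRuns, pickAdj]
  | cons x rest ih =>
    intro i u
    by_cases h : x = u
    · subst h; simp [pickRuns, ih]
    · have h' : ¬ u = x := fun hh => h hh.symm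
      simp [pickRuns, h', pickAdj, h, ih]

theorem pickGoA_machine (xs : List Int) :
    ∀ (prev i : Int) (pos : List Int) (prob : Option Int),
      (pickGoA prev xs i pos prob).1 = pos ++ pickMachine prev prob (pickRuns i (some prev) xs) := by
  induction xs with
  | nil => intro prev i pos prob; simp [pickGoA, pickMachine, pickRuns]
  | cons x rest ih =>
    intro prev i pos prob
    by_cases hgt : x > prev
    · have hne : x ≠ prev := ne_of_gt hgt
      have h' : ¬ prev = x := fun hh => hne hh.symm
      simp [pickGoA, hgt, pickRuns, h', ih, pickMachine]
    · by_cases hlt : x < prev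
      · have hne : x ≠ prev := ne_of_lt hlt
        have hng : ¬ x > prev := hgt
        cases prob with
        | some p =>
          have h' : ¬ prev = x := fun hh => hne hh.symm
          simp [pickGoA, hng, hlt, pickRuns, h', ih, pickMachine]
        | none =>
          have h' : ¬ prev = x := fun hh => hne hh.symm
          simp [pickGoA, hng, hlt, pickRuns, h', ih, pickMachine]
      · have heq : x = prev := le_antisymm (not_lt.mp hgt) (not_lt.mp hlt)
        subst heq
        simp [pickGoA, pickRuns, ih]

theorem pickMachine_windows (R : List (Int × Int)) :
    ∀ (p u : Int), pickAdj u R → pickWindows ((p, u) :: R) = pickMachine u none R := by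
  induction R with
  | nil => intro p u _; simp [pickWindows, pickMachine]
  | cons sv R' ih =>
    obtain ⟨s, v⟩ := sv
    intro p u hadj
    obtain ⟨hvu, hadj'⟩ := hadj
    cases R' with
    | nil =>
      simp only [pickWindows, pickMachine]
      split <;> simp
    | cons tw R'' =>
      obtain ⟨t, w⟩ := tw
      obtain ⟨hwv, hadj''⟩ := hadj'
      have ihv := ih s v ⟨hwv, hadj''⟩
      by_cases hvgt : v > u
      · by_cases hwgt : w > v
        · have : ¬ (u < v ∧ v > w) := by intro h; exact absurd h.2 (not_lt.mpr (le_of_lt hwgt))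
          simp only [pickWindows, pickMachine, if_pos hvgt, if_pos hwgt, if_neg this,
            List.nil_append]
          rw [ihv]; simp [pickMachine, hwgt]
        · have hwlt : w < v := lt_of_le_of_ne (not_lt.mp hwgt) hwv
          have hcond : u < v ∧ v > w := ⟨hvgt, hwlt⟩
          simp only [pickWindows, pickMachine, if_pos hvgt, if_neg hwgt, if_pos hcond]
          rw [ihv]; simp [pickMachine, hwgt]
      · have : ¬ (u < v ∧ v > w) := by intro h; exact absurd h.1 hvgt
        simp only [pickWindows, pickMachine, if_neg hvgt, if_neg this, List.nil_append]
        rw [ihv]; simp [pickMachine]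

theorem pick_pos_eq (a : Int) (rest : List Int) :
    (pickGoA a rest 1 [] none).1 = pickWindows (pickRuns 0 none (a :: rest)) := by
  have hruns : pickRuns 0 none (a :: rest) = (0, a) :: pickRuns 1 (some a) rest := by
    simp [pickRuns]
  rw [hruns, pickMachine_windows _ 0 a (pickRuns_adj rest 1 a), pickGoA_machine]
  simp

-- ===== VERDICT (by name: the statement is the Claim_ definition above) =====
theorem pick_peaks_best_spec : Claim_equal_pick_peaks_best := by
  intro arr _
  unfold Spec_pick_peaks_best
  cases arr with
  | nil => simp [pick_peaks_best, pick_peaks_best_alt, pickRuns, pickWindows]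
  | cons a rest => simp [pick_peaks_best, pick_peaks_best_alt, pick_pos_eq]
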